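-- pv_equiv track=rewrite | github.com/llouis0622/Algorithm_Deep_Dive | Programmers/Lv. 1/[월간코드] 음양 더하기.py | solution
-- ===== SOURCE A (Python) =====
-- def solution(absolutes, signs):
--     res = 0
--     for absolute, sign in zip(absolutes, signs):
--         if sign:
--             res += absolute
--         else:
--             res -= absolute
--     return res
-- ===== SOURCE B (Python) =====
-- def solution(absolutes, signs):
--     total = sum(a for a, s in zip(absolutes, signs))
--     neg = sum(a for a, s in zip(absolutes, signs) if not s)
--     return total - 2 * neg
-- ===== Notes on version B (the rewrite author's own statement) =====
-- stated objective: alternative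
-- what changed: Replaces the single per-element +/- branch loop with two branch-free sum passes over the zipped pairs (total and sum of negatives) combined algebraically as total - 2*neg.
import Mathlib
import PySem

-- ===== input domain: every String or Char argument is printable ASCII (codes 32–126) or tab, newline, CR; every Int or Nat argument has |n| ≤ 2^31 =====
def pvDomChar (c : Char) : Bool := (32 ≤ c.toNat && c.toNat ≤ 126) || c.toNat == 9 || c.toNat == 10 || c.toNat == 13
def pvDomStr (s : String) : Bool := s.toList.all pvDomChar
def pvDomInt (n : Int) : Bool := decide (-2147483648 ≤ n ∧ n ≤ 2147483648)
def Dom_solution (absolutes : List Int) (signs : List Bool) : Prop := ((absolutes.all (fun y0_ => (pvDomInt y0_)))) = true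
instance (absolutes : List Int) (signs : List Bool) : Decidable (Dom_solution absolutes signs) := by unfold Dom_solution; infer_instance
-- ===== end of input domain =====

-- B computes the signed sum as total - 2*(sum of non-sign elements), two passes over zip instead of one branching loop; same cost.


-- ===== PORT A =====
-- res = 0; for absolute, sign in zip(absolutes, signs): res += absolute if sign else res -= absolute
def solution (absolutes : List Int) (signs : List Bool) : Int :=
  (absolutes.zip signs).foldl (fun res p => if p.2 then res + p.1 else res - p.1) 0

-- ===== PORT B =====
-- total = sum over zip; neg = sum over zip where not sign; total - 2*neg
def solution_alt (absolutes : List Int) (signs : List Bool) : Int :=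
  let total := (absolutes.zip signs).foldl (fun t p => t + p.1) 0
  let neg := (absolutes.zip signs).foldl (fun t p => if p.2 then t else t + p.1) 0
  total - 2 * neg

-- ===== PRECONDITION & SPEC =====
def Spec_solution (absolutes : List Int) (signs : List Bool) (out : Int) : Prop := out = solution_alt absolutes signs
instance (absolutes : List Int) (signs : List Bool) (out : Int) : Decidable (Spec_solution absolutes signs out) := by unfold Spec_solution; infer_instance

-- ===== CLAIM (what is proved, stated in full; the proofs are below) =====
def Claim_equal_solution : Prop := ∀ (absolutes : List Int) (signs : List Bool), Dom_solution absolutes signs → Spec_solution absolutes signs (solution absolutes signs)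

-- ===== LEMMAS AND PROOFS =====

-- ===== VERDICT (by name: the statement is the Claim_ definition above) =====
theorem pv_shiftT (l : List (Int × Bool)) : ∀ (t : Int),
    l.foldl (fun t p => t + p.1) t = t + l.foldl (fun t p => t + p.1) 0 := by
  induction l with
  | nil => intro t; simp
  | cons hd tl ih =>
    intro t
    simp only [List.foldl_cons]
    rw [ih (t + hd.1), ih (0 + hd.1)]; ring

theorem pv_shiftN (l : List (Int × Bool)) : ∀ (n : Int),
    l.foldl (fun t p => if p.2 then t else t + p.1) n
      = n + l.foldl (fun t p => if p.2 then t else t + p.1) 0 := by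
  induction l with
  | nil => intro n; simp
  | cons hd tl ih =>
    intro n
    simp only [List.foldl_cons]
    cases hd.2 <;> simp only [if_true, if_false, Bool.false_eq_true]
    · rw [ih (n + hd.1), ih (0 + hd.1)]; ring
    · rw [ih n]

theorem pv_key (l : List (Int × Bool)) : ∀ (r : Int),
    l.foldl (fun res p => if p.2 then res + p.1 else res - p.1) r
      = r + (l.foldl (fun t p => t + p.1) 0
              - 2 * l.foldl (fun t p => if p.2 then t else t + p.1) 0) := by
  induction l with
  | nil => intro r; simp
  | cons hd tl ih =>
    intro r
    simp only [List.foldl_cons]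
    cases hd.2 <;> simp only [if_true, if_false, Bool.false_eq_true]
    · rw [ih (r - hd.1), pv_shiftT tl (0 + hd.1), pv_shiftN tl (0 + hd.1)]; ring
    · rw [ih (r + hd.1), pv_shiftT tl (0 + hd.1)]; ring

theorem solution_spec : Claim_equal_solution := by
  intro absolutes signs _
  unfold Spec_solution solution solution_alt
  rw [pv_key]
  ring
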